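-- pv_equiv track=rewrite | github.com/eidelmanjonathan/aws-batch-cbmc | ci/snapshot/new_tools/account_orchestration/AccountOrchestrator.py | parse_snapshot_id
-- ===== SOURCE A (Python) =====
-- def parse_snapshot_id(output):
--     sid = None
--     for line in output.split('\n'):
--         if line.startswith('Updating SnapshotID to '):
--             sid = line[len('Updating SnapshotID to '):]
--             break
--     if sid is None:
--         raise UserWarning("snapshot id is none")
--     return sid
-- ===== SOURCE B (Python) =====
-- def parse_snapshot_id(output):
--     marker = 'Updating SnapshotID to '
--     s = output
--     while True:
--         if s.startswith(marker):
--             rest = s[len(marker):]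
--             nl = rest.find('\n')
--             return rest if nl == -1 else rest[:nl]
--         nl = s.find('\n')
--         if nl == -1:
--             raise UserWarning("snapshot id is none")
--         s = s[nl + 1:]
-- ===== Notes on version B (the rewrite author's own statement) =====
-- stated objective: alternative
-- what changed: B scans the string in place with startswith/find/slicing on the remaining suffix instead of materialising the list of lines with split and looping over it.
import Mathlib
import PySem

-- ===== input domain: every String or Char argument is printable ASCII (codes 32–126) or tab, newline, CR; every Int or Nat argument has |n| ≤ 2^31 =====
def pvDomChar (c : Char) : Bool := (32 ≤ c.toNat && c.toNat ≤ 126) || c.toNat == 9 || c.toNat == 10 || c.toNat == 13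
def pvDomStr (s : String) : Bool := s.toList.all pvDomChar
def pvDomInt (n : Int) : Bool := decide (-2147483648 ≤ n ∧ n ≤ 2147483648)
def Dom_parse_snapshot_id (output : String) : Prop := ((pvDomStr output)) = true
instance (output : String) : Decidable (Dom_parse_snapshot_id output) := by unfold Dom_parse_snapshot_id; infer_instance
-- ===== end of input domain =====

-- B replaces A's split('\n')-then-loop with a single in-place scan of the string
-- (startswith / find / slice on the remaining suffix), never materialising the line list;
-- objective: alternative. Where the Python raises UserWarning (no line starts with the
-- marker) both ports return "" and those inputs are excluded by Pre_.

-- the shared string constant 'Updating SnapshotID to '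
def pvMarker : List Char := "Updating SnapshotID to ".toList

-- ===== PORT A =====
-- for line in output.split('\n'): if line.startswith(marker): sid = line[len(marker):]; break
def parseLoopA : List (List Char) → Option (List Char)
  | [] => none
  | l :: ls =>
    if PySem.Chars.startswith l pvMarker then
      some (PySem.Chars.slice l (some (pvMarker.length : Int)) none)
    else parseLoopA ls

def parse_snapshot_id (output : String) : String :=
  match parseLoopA (PySem.Chars.splitOn output.toList ['\n']) with
  | none => ""          -- Python raises UserWarning here; excluded by Pre_
  | some sid => String.ofList sid

-- ===== PORT B =====
-- while True: if s.startswith(marker): rest = s[len(marker):]; nl = rest.find('\n');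
--               return rest if nl == -1 else rest[:nl]
--             nl = s.find('\n'); if nl == -1: raise UserWarning(...); s = s[nl+1:]
def parseScanB (s : List Char) : Option (List Char) :=
  if PySem.Chars.startswith s pvMarker then
    let rest := PySem.Chars.slice s (some (pvMarker.length : Int)) none
    let nl := PySem.Chars.find rest ['\n']
    some (if nl = -1 then rest else PySem.Chars.slice rest none (some nl))
  else
    let nl := PySem.Chars.find s ['\n']
    if h : nl = -1 then none
    else parseScanB (PySem.Chars.slice s (some (nl + 1)) none)
termination_by s.length
decreasing_by
  simp only [PySem.Chars.slice_eq_listSlice]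
  have h0 : (0:Int) ≤ PySem.Chars.find s ['\n'] + 1 := by
    have := PySem.Chars.neg_one_le_find s ['\n']; omega
  have h1 : 0 ≤ PySem.Chars.find s ['\n'] := by
    have := PySem.Chars.neg_one_le_find s ['\n']; omega
  have hpos : 0 < s.length := by
    have hinf := (PySem.Chars.find_nonneg_iff s ['\n']).mp h1
    have hmem : '\n' ∈ s := (List.singleton_infix_iff _ _).mp hinf
    exact List.length_pos_iff.mpr (List.ne_nil_of_mem hmem)
  rw [PySem.List.slice_from s h0]
  simp only [List.length_drop]
  omega

def parse_snapshot_id_alt (output : String) : String :=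
  match parseScanB output.toList with
  | none => ""          -- Python raises UserWarning here; excluded by Pre_
  | some sid => String.ofList sid

-- ===== PRECONDITION & SPEC =====
-- Pre_ excludes exactly the inputs where A raises UserWarning: no line of the output
-- starts with the marker prefix pvMarker.
def Pre_parse_snapshot_id (output : String) : Prop :=
  ∃ l ∈ PySem.Chars.splitOn output.toList ['\n'], PySem.Chars.startswith l pvMarker = true
instance (output : String) : Decidable (Pre_parse_snapshot_id output) := by
  unfold Pre_parse_snapshot_id; infer_instance

def pvWitness_parse_snapshot_id : String := "ok\nUpdating SnapshotID to abc-123\ndone"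

def Spec_parse_snapshot_id (output : String) (out : String) : Prop := out = parse_snapshot_id_alt output
instance (output : String) (out : String) : Decidable (Spec_parse_snapshot_id output out) := by
  unfold Spec_parse_snapshot_id; infer_instance

-- ===== CLAIM (what is proved, stated in full; the proofs are below) =====
def Claim_equal_parse_snapshot_id : Prop := ∀ (output : String), Dom_parse_snapshot_id output → Pre_parse_snapshot_id output → Spec_parse_snapshot_id output (parse_snapshot_id output)

-- ===== LEMMAS AND PROOFS =====

-- structural recursion equivalent of splitOn on a single-character separator
def easySplit (c : Char) : List Char → List (List Char)
  | [] => [[]]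
  | a :: t => if a = c then [] :: easySplit c t else (easySplit c t).modifyHead (a :: ·)

theorem splitOn_go_eq_easySplit (c : Char) (l : List Char) :
    ∀ (fuel : Nat) (cur : List Char) (acc : List (List Char)), l.length ≤ fuel →
      PySem.Chars.splitOn.go [c] fuel l cur acc
        = acc.reverse ++ (easySplit c l).modifyHead (cur.reverse ++ ·) := by
  induction l with
  | nil =>
    intro fuel cur acc _
    cases fuel <;> simp [PySem.Chars.splitOn.go, easySplit]
  | cons a t ih =>
    intro fuel cur acc hfuel
    cases fuel with
    | zero => simp at hfuel
    | succ fuel =>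
      by_cases hac : a = c
      · subst hac
        have hpre : [a].isPrefixOf (a :: t) = true := by simp [List.isPrefixOf]
        simp only [PySem.Chars.splitOn.go, hpre, if_pos]
        rw [show List.drop ([a].length) (a :: t) = t from rfl]
        rw [ih fuel [] (cur.reverse :: acc) (by simpa using Nat.le_of_succ_le_succ hfuel)]
        simp [easySplit, List.modifyHead]
        cases h : easySplit a t <;> rfl
      · have hpre : [c].isPrefixOf (a :: t) = false := by
          simp [List.isPrefixOf]
          intro h; exact absurd h.symm hac
        simp only [PySem.Chars.splitOn.go, hpre]
        rw [if_neg (by simp)]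
        rw [ih fuel (a :: cur) acc (by simpa using Nat.le_of_succ_le_succ hfuel)]
        simp only [easySplit, if_neg hac]
        cases h : easySplit c t with
        | nil => simp [List.modifyHead]
        | cons x xs => simp [List.modifyHead]

theorem splitOn_eq_easySplit (c : Char) (s : List Char) :
    PySem.Chars.splitOn s [c] = easySplit c s := by
  rw [PySem.Chars.splitOn, splitOn_go_eq_easySplit c s (s.length + 1) [] [] (by omega)]
  cases h : easySplit c s with
  | nil => simp [List.modifyHead]
  | cons x xs => simp [List.modifyHead]

theorem easySplit_no_sep (c : Char) (s : List Char) (h : c ∉ s) :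
    easySplit c s = [s] := by
  induction s with
  | nil => rfl
  | cons a t ih =>
    simp only [List.mem_cons, not_or] at h
    simp [easySplit, Ne.symm h.1, ih h.2, List.modifyHead]

theorem easySplit_cons (c : Char) (pre post : List Char) (h : c ∉ pre) :
    easySplit c (pre ++ c :: post) = pre :: easySplit c post := by
  induction pre with
  | nil => simp [easySplit]
  | cons a t ih =>
    simp only [List.mem_cons, not_or] at h
    simp [easySplit, Ne.symm h.1, ih h.2, List.modifyHead]

-- m is a prefix of pre ++ c :: post iff it is a prefix of pre, when c occurs in neither m nor pre
theorem prefix_through (m pre post : List Char) (c : Char) (hm : c ∉ m) :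
    (m <+: pre ++ c :: post) ↔ m <+: pre := by
  constructor
  · intro h
    have hpc : pre ++ [c] <+: pre ++ c :: post := ⟨post, by simp⟩
    rcases List.prefix_or_prefix_of_prefix h hpc with h1 | h1
    · have hle : m.length ≤ pre.length := by
        by_contra hgt
        have hlen2 : m.length ≤ pre.length + 1 := by
          have := h1.length_le; simpa using this
        have heqlen : m.length = (pre ++ [c]).length := by simp; omega
        have := h1.eq_of_length heqlen
        exact hm (this ▸ (by simp : c ∈ pre ++ [c]))
      have heq := List.prefix_iff_eq_take.mp h1
      rw [List.take_append_of_le_length hle] at heq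
      exact heq ▸ List.take_prefix _ _
    · exact absurd (h1.subset (by simp)) hm
  · intro h
    exact h.trans (List.prefix_append _ _)

theorem find_go_first (c : Char) (u v : List Char) (hu : c ∉ u) :
    ∀ k : Nat, PySem.Chars.find.go [c] (u ++ c :: v) k = (k : Int) + u.length := by
  induction u with
  | nil =>
    intro k
    have hp : [c].isPrefixOf (c :: v) = true := by simp [List.isPrefixOf]
    simp [PySem.Chars.find.go, hp]
  | cons a t ih =>
    intro k
    simp only [List.mem_cons, not_or] at hu
    have hp : [c].isPrefixOf (a :: (t ++ c :: v)) = false := by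
      simp [List.isPrefixOf]
      exact fun h => hu.1 h
    simp only [List.cons_append, PySem.Chars.find.go, hp, Bool.false_eq_true, if_false]
    rw [ih hu.2 (k + 1)]
    simp only [List.length_cons]
    push_cast
    omega

theorem find_first (c : Char) (u v : List Char) (hu : c ∉ u) :
    PySem.Chars.find (u ++ c :: v) [c] = (u.length : Int) := by
  rw [PySem.Chars.find, find_go_first c u v hu 0]
  simp

theorem find_no (c : Char) (s : List Char) (h : c ∉ s) :
    PySem.Chars.find s [c] = -1 := by
  rw [PySem.Chars.find_eq_neg_one_iff]
  rw [List.singleton_infix_iff]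
  exact h

theorem mem_decomp (c : Char) (s : List Char) (h : c ∈ s) :
    ∃ pre post, s = pre ++ c :: post ∧ c ∉ pre := by
  induction s with
  | nil => simp at h
  | cons a t ih =>
    by_cases hac : a = c
    · exact ⟨[], t, by simp [hac], by simp⟩
    · have ht : c ∈ t := by
        rcases List.mem_cons.mp h with h1 | h1
        · exact absurd h1.symm hac
        · exact h1
      obtain ⟨pre, post, heq, hpre⟩ := ih ht
      exact ⟨a :: pre, post, by simp [heq], by simp [hpre]; intro hc; exact hac hc.symm⟩

theorem newline_not_in_marker : '\n' ∉ pvMarker := by decide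

theorem main_lemma (s : List Char) :
    parseScanB s = parseLoopA (easySplit '\n' s) := by
  induction s using parseScanB.induct with
  | case1 s hsw =>
    rw [parseScanB, if_pos hsw]
    by_cases hmem : '\n' ∈ s
    · obtain ⟨pre, post, hseq, hprene⟩ := mem_decomp '\n' s hmem
      subst hseq
      have hmpre : pvMarker <+: pre :=
        (prefix_through pvMarker pre post '\n' newline_not_in_marker).mp
          ((PySem.Chars.startswith_iff _ _).mp hsw)
      have hlen : pvMarker.length ≤ pre.length := hmpre.length_le
      rw [easySplit_cons '\n' pre post hprene]
      simp only [parseLoopA]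
      rw [if_pos ((PySem.Chars.startswith_iff pre pvMarker).mpr hmpre)]
      have hrest : PySem.Chars.slice (pre ++ '\n' :: post) (some (pvMarker.length : Int)) none
          = pre.drop pvMarker.length ++ '\n' :: post := by
        simp only [PySem.Chars.slice_eq_listSlice, PySem.List.slice_from_natCast]
        exact List.drop_append_of_le_length hlen
      rw [hrest]
      have hnin : '\n' ∉ pre.drop pvMarker.length :=
        fun hc => hprene (List.mem_of_mem_drop hc)
      rw [find_first '\n' _ post hnin]
      have hne : (((pre.drop pvMarker.length).length : Int)) ≠ -1 := by
        have := Int.natCast_nonneg ((pre.drop pvMarker.length).length); omega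
      rw [if_neg hne]
      have htake : PySem.Chars.slice (pre.drop pvMarker.length ++ '\n' :: post) none
            (some ((pre.drop pvMarker.length).length : Int))
          = pre.drop pvMarker.length := by
        simp only [PySem.Chars.slice_eq_listSlice, PySem.List.slice_to_natCast]
        exact List.take_left
      rw [htake]
      simp only [PySem.Chars.slice_eq_listSlice, PySem.List.slice_from_natCast]
    · rw [easySplit_no_sep '\n' s hmem]
      simp only [parseLoopA]
      rw [if_pos hsw]
      have hnin : '\n' ∉ PySem.Chars.slice s (some (pvMarker.length : Int)) none := by
        simp only [PySem.Chars.slice_eq_listSlice, PySem.List.slice_from_natCast]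
        exact fun hc => hmem (List.mem_of_mem_drop hc)
      rw [find_no '\n' _ hnin]
      simp
  | case2 s hsw nl hnl =>
    rw [parseScanB, if_neg hsw, dif_pos (show PySem.Chars.find s ['\n'] = -1 from hnl)]
    have hmem : '\n' ∉ s := by
      rw [PySem.Chars.find_eq_neg_one_iff] at hnl
      exact fun hc => hnl ((List.singleton_infix_iff _ _).mpr hc)
    rw [easySplit_no_sep '\n' s hmem]
    simp only [parseLoopA]
    rw [if_neg (by simp [hsw])]
  | case3 s hsw nl hnl ih =>
    have hnl' : ¬ PySem.Chars.find s ['\n'] = -1 := hnl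
    rw [parseScanB, if_neg hsw, dif_neg hnl']
    have h1 : 0 ≤ PySem.Chars.find s ['\n'] := by
      have := PySem.Chars.neg_one_le_find s ['\n']; omega
    have hmem : '\n' ∈ s :=
      (List.singleton_infix_iff _ _).mp ((PySem.Chars.find_nonneg_iff s ['\n']).mp h1)
    obtain ⟨pre, post, hseq, hprene⟩ := mem_decomp '\n' s hmem
    subst hseq
    have hnlv : nl = (pre.length : Int) := find_first '\n' pre post hprene
    rw [find_first '\n' pre post hprene]
    rw [hnlv] at ih
    have hdrop : PySem.Chars.slice (pre ++ '\n' :: post) (some ((pre.length : Int) + 1)) none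
        = post := by
      simp only [PySem.Chars.slice_eq_listSlice]
      rw [PySem.List.slice_from _ (by omega)]
      rw [show ((pre.length : Int) + 1).toNat = (pre ++ ['\n']).length by simp]
      rw [show pre ++ '\n' :: post = (pre ++ ['\n']) ++ post by simp]
      exact List.drop_left
    rw [hdrop] at ih
    rw [hdrop]
    rw [easySplit_cons '\n' pre post hprene]
    simp only [parseLoopA]
    have hswp : ¬ PySem.Chars.startswith pre pvMarker = true := by
      intro hp
      exact hsw ((PySem.Chars.startswith_iff _ _).mpr
        (((prefix_through pvMarker pre post '\n' newline_not_in_marker).mpr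
          ((PySem.Chars.startswith_iff _ _).mp hp))))
    rw [if_neg hswp]
    exact ih

theorem loopA_eq (output : String) :
    parseLoopA (PySem.Chars.splitOn output.toList ['\n']) = parseScanB output.toList := by
  rw [splitOn_eq_easySplit, main_lemma]

-- ===== VERDICT (by name: the statement is the Claim_ definition above) =====
theorem parse_snapshot_id_spec : Claim_equal_parse_snapshot_id := by
  intro output _ _
  unfold Spec_parse_snapshot_id parse_snapshot_id parse_snapshot_id_alt
  rw [loopA_eq]
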